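-- pv_equiv track=rewrite | github.com/SangjinH/algorithm | programmers/devMatching/21하/2.py | solution
-- ===== SOURCE A (Python) =====
-- check = {
--     'MON': 5,
--     'TUE': 4,
--     'WED': 3,
--     'THU': 2,
--     'FRI': 1,
-- }
--
-- def solution(leave, day, holidays):
--     if leave == 30:
--         return 30
--
--     if day not in ['SAT', 'SUN']:
--         sat = 1 + check[day]
--         sun = sat + 1
--     elif day == 'SAT':
--         sat = 1
--         sun = 2
--
--     elif day == 'SUN':
--         sun = 1
--         sat = 7
--
--     holidays.append(sat)
--     holidays.append(sun)
--     sat += 7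
--     sun += 7
--
--     while 1:
--         if sat <= 30:
--             holidays.append(sat)
--             sat += 7
--         else:
--             break
--
--     while 1:
--         if sun <= 30:
--             holidays.append(sun)
--             sun += 7
--         else:
--             break
--
--     holidays = list(set(sorted(holidays)))
--
--     answer = 0
--     cnt = 0
--     total = 0
--     for start in range(1, 30):
--         e = start
--         while cnt < leave and e <= 30:
--             if e not in holidays:
--                 cnt += 1
--             total += 1
--             e += 1
--
--         while e in holidays:
--             total += 1
--             e += 1
--
--         if total > answer:
--             answer = total
--         total = 0
--         cnt = 0
--
--     return answer
-- ===== SOURCE B (Python) =====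
-- def solution(leave, day, holidays):
--     if leave == 30:
--         return 30
--
--     offsets = {'MON': 5, 'TUE': 4, 'WED': 3, 'THU': 2, 'FRI': 1}
--     if day not in ['SAT', 'SUN']:
--         sat = 1 + offsets[day]
--         sun = sat + 1
--     elif day == 'SAT':
--         sat, sun = 1, 2
--     else:
--         sun, sat = 1, 7
--
--     holidays.append(sat)
--     holidays.append(sun)
--     sat += 7
--     sun += 7
--     while sat <= 30:
--         holidays.append(sat)
--         sat += 7
--     while sun <= 30:
--         holidays.append(sun)
--         sun += 7
--
--     hset = set(holidays)
--     work = [d for d in range(1, 31) if d not in hset]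
--
--     best = 0
--     for start in range(1, 30):
--         rest = [d for d in work if d >= start]
--         if leave <= 0:
--             e = start
--         elif leave <= len(rest):
--             e = rest[leave - 1] + 1
--         else:
--             e = 31
--         while e in hset:
--             e += 1
--         if e - start > best:
--             best = e - start
--     return best
-- ===== Notes on version B (the rewrite author's own statement) =====
-- stated objective: alternative
-- what changed: The nested per-day counting scans (inner while advancing e one day at a time while counting used leave, for every start) are replaced by precomputing the list of working days once and, for each start, jumping directly to the leave-th working day at/after start to get the window end; membership tests use a set built once instead of scanning the holidays list.
-- outside the precondition, e.g. on solution(5, 'XYZ', []): A raises KeyError, B raises KeyError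
import Mathlib
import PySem

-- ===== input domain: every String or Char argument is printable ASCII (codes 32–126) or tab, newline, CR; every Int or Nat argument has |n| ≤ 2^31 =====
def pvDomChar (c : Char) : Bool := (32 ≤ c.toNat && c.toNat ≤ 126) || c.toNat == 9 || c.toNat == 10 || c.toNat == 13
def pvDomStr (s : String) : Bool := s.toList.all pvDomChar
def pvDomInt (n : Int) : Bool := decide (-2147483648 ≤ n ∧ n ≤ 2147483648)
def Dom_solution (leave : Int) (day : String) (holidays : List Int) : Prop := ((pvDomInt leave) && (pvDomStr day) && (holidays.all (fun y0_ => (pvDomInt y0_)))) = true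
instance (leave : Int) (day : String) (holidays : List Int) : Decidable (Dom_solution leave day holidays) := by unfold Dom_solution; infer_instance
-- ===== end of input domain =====

-- B replaces A's per-day counting scans by jumping straight to the k-th working day at/after each
-- start (over a precomputed working-day list); equivalence is about the RETURN value (both versions
-- perform the same appends to the caller's `holidays` list).

-- termination helper for the `while e in holidays` loops (cited by the ports' decreasing_by)
theorem pvFilterGe_split (L : List Int) (e : Int) :
    (L.filter (fun x => decide (e ≤ x))).length
      = (L.filter (fun x => decide (e + 1 ≤ x))).length + L.count e := by
  induction L with
  | nil => simp
  | cons a t ih =>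
    simp only [List.filter_cons, List.count_cons]
    rcases lt_trichotomy a e with h | h | h
    · rw [if_neg (by simpa using by omega), if_neg (by simpa using by omega)]
      rw [ih]
      have : (a == e) = false := by simpa using by omega
      rw [this]
      simp
    · subst h
      rw [if_pos (by simp), if_neg (by simpa using by omega)]
      have : (a == a) = true := by simp
      rw [this]
      simp only [List.length_cons, if_true]
      omega
    · rw [if_pos (by simpa using by omega), if_pos (by simpa using by omega)]
      have : (a == e) = false := by simpa using by omega
      simp only [this, List.length_cons, Bool.false_eq_true, if_false]
      omega

theorem pvFilterGe_lt (L : List Int) (e : Int) (h : e ∈ L) :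
    (L.filter (fun x => decide (e + 1 ≤ x))).length < (L.filter (fun x => decide (e ≤ x))).length := by
  have hc : 0 < L.count e := List.count_pos_iff.mpr h
  have := pvFilterGe_split L e
  omega

-- ===== PORT A =====
def pvCheck : PySem.Dict String Int :=
  PySem.Dict.ofList [("MON", 5), ("TUE", 4), ("WED", 3), ("THU", 2), ("FRI", 1)]

-- `while 1: if d <= 30: holidays.append(d); d += 7 else: break`
def pvWeekly (hs : List Int) (d : Int) : List Int :=
  if d ≤ 30 then pvWeekly (hs ++ [d]) (d + 7) else hs
termination_by (31 - d).toNat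
decreasing_by omega

-- `while cnt < leave and e <= 30: ...` (returns final (total, e))
def pvInnerA (L : List Int) (leave cnt total e : Int) : Int × Int :=
  if cnt < leave ∧ e ≤ 30 then
    if L.contains e then pvInnerA L leave cnt (total + 1) (e + 1)
    else pvInnerA L leave (cnt + 1) (total + 1) (e + 1)
  else (total, e)
termination_by (31 - e).toNat
decreasing_by all_goals omega

-- `while e in holidays: total += 1; e += 1`
def pvTrailA (L : List Int) (total e : Int) : Int × Int :=
  if h : L.contains e then pvTrailA L (total + 1) (e + 1) else (total, e)
termination_by (L.filter (fun x => decide (e ≤ x))).length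
decreasing_by exact pvFilterGe_lt L e (by simpa using h)

def solution (leave : Int) (day : String) (holidays : List Int) : Int :=
  if leave == 30 then 30
  else
    let ss : Int × Int :=
      if ¬(day = "SAT" ∨ day = "SUN") then
        -- `check[day]`: KeyError for any other day name — excluded by Pre_solution
        let sat := 1 + (PySem.Dict.get? pvCheck day).getD 0
        (sat, sat + 1)
      else if day = "SAT" then (1, 2)
      else (7, 1)
    let hs0 := holidays ++ [ss.1] ++ [ss.2]
    let hs1 := pvWeekly hs0 (ss.1 + 7)
    let hs2 := pvWeekly hs1 (ss.2 + 7)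
    -- holidays = list(set(sorted(holidays)))  (only membership is used afterwards)
    let L : List Int := PySem.Set.ofList (PySem.List.sorted hs2 (fun x => x) false)
    (PySem.List.pyRange 1 30 1).foldl
      (fun answer start =>
        let r1 := pvInnerA L leave 0 0 start
        let r2 := pvTrailA L r1.1 r1.2
        if r2.1 > answer then r2.1 else answer) 0

-- ===== PORT B =====
-- `while e in hset: e += 1`
def pvSkipB (L : List Int) (e : Int) : Int :=
  if h : PySem.Set.contains L e then pvSkipB L (e + 1) else e
termination_by (L.filter (fun x => decide (e ≤ x))).length
decreasing_by exact pvFilterGe_lt L e (by simpa using h)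

def solution_alt (leave : Int) (day : String) (holidays : List Int) : Int :=
  if leave == 30 then 30
  else
    let ss : Int × Int :=
      if ¬(day = "SAT" ∨ day = "SUN") then
        let sat := 1 + (PySem.Dict.get? pvCheck day).getD 0
        (sat, sat + 1)
      else if day = "SAT" then (1, 2)
      else (7, 1)
    let hs0 := holidays ++ [ss.1] ++ [ss.2]
    let hs1 := pvWeekly hs0 (ss.1 + 7)
    let hs2 := pvWeekly hs1 (ss.2 + 7)
    let L : PySem.Set Int := PySem.Set.ofList hs2
    let work := (PySem.List.pyRange 1 31 1).filter (fun d => !(PySem.Set.contains L d))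
    (PySem.List.pyRange 1 30 1).foldl
      (fun best start =>
        let rest := work.filter (fun d => decide (start ≤ d))
        let e0 : Int :=
          if leave ≤ 0 then start
          else if leave ≤ (rest.length : Int) then (PySem.List.pyGet? rest (leave - 1)).getD 0 + 1
          else 31
        let e := pvSkipB L e0
        if e - start > best then e - start else best) 0

-- ===== PRECONDITION & SPEC =====
-- Pre_ excludes only inputs where A raises KeyError: leave ≠ 30 and day not one of the 7 day names.
def Pre_solution (leave : Int) (day : String) (holidays : List Int) : Prop :=
  leave = 30 ∨ day ∈ (["MON", "TUE", "WED", "THU", "FRI", "SAT", "SUN"] : List String)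
instance (leave : Int) (day : String) (holidays : List Int) : Decidable (Pre_solution leave day holidays) := by
  unfold Pre_solution; infer_instance

def pvWitness_solution : Int × String × List Int := (3, "MON", [4])

def Spec_solution (leave : Int) (day : String) (holidays : List Int) (out : Int) : Prop := out = solution_alt leave day holidays
instance (leave : Int) (day : String) (holidays : List Int) (out : Int) : Decidable (Spec_solution leave day holidays out) := by unfold Spec_solution; infer_instance

-- ===== CLAIM (what is proved, stated in full; the proofs are below) =====
def Claim_equal_solution : Prop := ∀ (leave : Int) (day : String) (holidays : List Int), Dom_solution leave day holidays → Pre_solution leave day holidays → Spec_solution leave day holidays (solution leave day holidays)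

-- ===== LEMMAS AND PROOFS =====

-- the endpoint of A's inner while-loop, characterised by the k-th working day at/after e
def pvCore (L : List Int) (k e : Int) : Int :=
  let rest := (PySem.List.pyRange e 31 1).filter (fun d => !(L.contains d))
  if k ≤ 0 then e
  else if k ≤ (rest.length : Int) then (PySem.List.pyGet? rest (k - 1)).getD 0 + 1
  else 31

theorem pvTrail_eq (L : List Int) (total e : Int) :
    pvTrailA L total e = (total + (pvSkipB L e - e), pvSkipB L e) := by
  fun_induction pvTrailA L total e with
  | case1 total e h ih =>
    rw [pvSkipB]
    have h' : PySem.Set.contains L e = true := by simpa using h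
    rw [dif_pos h']
    rw [ih]
    have harith : total + 1 + (pvSkipB L (e + 1) - (e + 1)) = total + (pvSkipB L (e + 1) - e) := by
      ring
    rw [harith]
  | case2 total e h =>
    rw [pvSkipB]
    have h' : ¬ PySem.Set.contains L e = true := by simpa using h
    rw [dif_neg h']
    simp

theorem pvSkipB_congr (L₁ L₂ : List Int) (hm : ∀ x, L₁.contains x = L₂.contains x) (e : Int) :
    pvSkipB L₁ e = pvSkipB L₂ e := by
  fun_induction pvSkipB L₁ e with
  | case1 e h ih =>
    conv_rhs => rw [pvSkipB]
    have : PySem.Set.contains L₂ e = true := by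
      simp only [PySem.Set.contains_eq_listContains, ← hm e]
      simpa [PySem.Set.contains_eq_listContains] using h
    rw [dif_pos this, ih]
  | case2 e h =>
    conv_rhs => rw [pvSkipB]
    have : ¬ PySem.Set.contains L₂ e = true := by
      simp only [PySem.Set.contains_eq_listContains, ← hm e]
      simpa [PySem.Set.contains_eq_listContains] using h
    rw [dif_neg this]

theorem pvCore_congr (L₁ L₂ : List Int) (hm : ∀ x, L₁.contains x = L₂.contains x) (k e : Int) :
    pvCore L₁ k e = pvCore L₂ k e := by
  unfold pvCore
  have : (fun d => !(L₁.contains d)) = (fun d => !(L₂.contains d)) := by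
    funext d; rw [hm d]
  rw [this]

theorem pvCore_nonpos (L : List Int) (k e : Int) (hk : k ≤ 0) : pvCore L k e = e := by
  unfold pvCore; simp [hk]

theorem pvCore_31 (L : List Int) (k : Int) : pvCore L k 31 = 31 := by
  unfold pvCore
  rw [PySem.List.pyRange_one_eq_nil (by omega)]
  simp
  intro h; omega

theorem pvGet?_cons_pos (a : Int) (xs : List Int) (i : Int) (h1 : 1 ≤ i) :
    PySem.List.pyGet? (a :: xs) i = PySem.List.pyGet? xs (i - 1) := by
  simp only [PySem.List.pyGet?, PySem.List.pyIdx?, List.length_cons]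
  rw [if_pos (by omega : (0:Int) ≤ i), if_pos (by omega : (0:Int) ≤ i - 1)]
  by_cases h2 : i < ((xs.length + 1 : Nat) : Int)
  · rw [if_pos h2, if_pos (by push_cast at h2 ⊢; omega)]
    have : i.toNat = (i - 1).toNat + 1 := by omega
    rw [this]
    simp
  · rw [if_neg h2, if_neg (by push_cast at h2 ⊢; omega)]
    rfl

theorem pvCore_hol (L : List Int) (k e : Int) (he : e ≤ 30) (hm : L.contains e = true) (hk : 1 ≤ k) :
    pvCore L k e = pvCore L k (e + 1) := by
  unfold pvCore
  rw [PySem.List.pyRange_one_cons (by omega : e < 31)]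
  simp only [List.filter_cons, hm, Bool.not_true, Bool.false_eq_true, if_false]
  rw [if_neg (by omega : ¬ k ≤ 0), if_neg (by omega : ¬ k ≤ 0)]

theorem pvCore_work (L : List Int) (k e : Int) (he : e ≤ 30) (hm : L.contains e = false) (hk : 1 ≤ k) :
    pvCore L k e = pvCore L (k - 1) (e + 1) := by
  unfold pvCore
  rw [PySem.List.pyRange_one_cons (by omega : e < 31)]
  simp only [List.filter_cons, hm, Bool.not_false, if_true, List.length_cons]
  rw [if_neg (by omega : ¬ k ≤ 0)]
  by_cases hk1 : k = 1
  · subst hk1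
    rw [if_pos (by push_cast; omega), if_pos (by omega : (1:Int) - 1 ≤ 0)]
    rw [show ((1:Int) - 1) = 0 from by ring]
    simp [PySem.List.pyGet?, PySem.List.pyIdx?]
  · have hk2 : 2 ≤ k := by omega
    rw [if_neg (by omega : ¬ k - 1 ≤ 0)]
    by_cases hlen : k - 1 ≤ (((PySem.List.pyRange (e+1) 31 1).filter (fun d => !(L.contains d))).length : Int)
    · rw [if_pos (by push_cast at hlen ⊢; omega), if_pos hlen]
      rw [pvGet?_cons_pos _ _ _ (by omega)]
    · rw [if_neg (by push_cast at hlen ⊢; omega), if_neg hlen]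

theorem pvInner_eq_aux (L : List Int) (leave : Int) :
    ∀ (n : Nat) (e cnt total : Int), e ≤ 31 → (31 - e).toNat = n →
      pvInnerA L leave cnt total e
        = (total + (pvCore L (leave - cnt) e - e), pvCore L (leave - cnt) e) := by
  intro n
  induction n using Nat.strong_induction_on with
  | _ n ih =>
    intro e cnt total he hn
    by_cases hc : cnt < leave ∧ e ≤ 30
    · rw [pvInnerA, if_pos hc]
      have hk : 1 ≤ leave - cnt := by omega
      by_cases hm : L.contains e
      · rw [if_pos hm]
        rw [ih (31 - (e+1)).toNat (by omega) (e+1) cnt (total+1) (by omega) rfl]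
        rw [← pvCore_hol L (leave - cnt) e hc.2 hm hk]
        simp only [Prod.mk.injEq]
        exact ⟨by omega, trivial⟩
      · rw [if_neg hm]
        rw [ih (31 - (e+1)).toNat (by omega) (e+1) (cnt+1) (total+1) (by omega) rfl]
        have hsub : leave - (cnt + 1) = leave - cnt - 1 := by ring
        rw [hsub, ← pvCore_work L (leave - cnt) e hc.2 (by simpa using hm) hk]
        simp only [Prod.mk.injEq]
        exact ⟨by omega, trivial⟩
    · rw [pvInnerA, if_neg hc]
      have hcore : pvCore L (leave - cnt) e = e := by
        by_cases hk : leave - cnt ≤ 0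
        · exact pvCore_nonpos L _ e hk
        · have h31 : e = 31 := by omega
          subst h31
          exact pvCore_31 L _
      rw [hcore]
      simp only [Prod.mk.injEq]
      exact ⟨by omega, trivial⟩

theorem pvInner_eq (L : List Int) (leave e cnt total : Int) (he : e ≤ 31) :
    pvInnerA L leave cnt total e
      = (total + (pvCore L (leave - cnt) e - e), pvCore L (leave - cnt) e) :=
  pvInner_eq_aux L leave (31 - e).toNat e cnt total he rfl

theorem pvRest_bridge (L : List Int) (s : Int) (h1 : 1 ≤ s) (h2 : s ≤ 31) :
    ((PySem.List.pyRange 1 31 1).filter (fun d => !(L.contains d))).filter (fun d => decide (s ≤ d))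
      = (PySem.List.pyRange s 31 1).filter (fun d => !(L.contains d)) := by
  rw [List.filter_filter]
  rw [PySem.List.pyRange_one_append 1 s 31 h1 h2, List.filter_append]
  have hnil : (PySem.List.pyRange 1 s 1).filter (fun d => decide (s ≤ d) && !(L.contains d)) = [] := by
    rw [List.filter_eq_nil_iff]
    intro x hx
    have hxr := PySem.List.mem_pyRange_one.mp hx
    have : decide (s ≤ x) = false := by simp; omega
    simp [this]
  rw [hnil, List.nil_append]
  apply List.filter_congr
  intro x hx
  have hxr := PySem.List.mem_pyRange_one.mp hx
  have : decide (s ≤ x) = true := by simp; omega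
  simp [this]

theorem pvMain (L₁ L₂ : List Int) (hm : ∀ x, L₁.contains x = L₂.contains x) (leave : Int) :
    (PySem.List.pyRange 1 30 1).foldl
      (fun answer start =>
        let r1 := pvInnerA L₁ leave 0 0 start
        let r2 := pvTrailA L₁ r1.1 r1.2
        if r2.1 > answer then r2.1 else answer) 0
    = (PySem.List.pyRange 1 30 1).foldl
      (fun best start =>
        let rest := ((PySem.List.pyRange 1 31 1).filter (fun d => !(PySem.Set.contains L₂ d))).filter
          (fun d => decide (start ≤ d))
        let e0 : Int :=
          if leave ≤ 0 then start
          else if leave ≤ (rest.length : Int) then (PySem.List.pyGet? rest (leave - 1)).getD 0 + 1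
          else 31
        let e := pvSkipB L₂ e0
        if e - start > best then e - start else best) 0 := by
  apply PySem.List.foldl_congr_mem
  intro acc s hs
  have hsr := PySem.List.mem_pyRange_one.mp hs
  simp only [PySem.Set.contains_eq_listContains]
  rw [pvInner_eq L₁ leave s 0 0 (by omega)]
  have hz : leave - 0 = leave := by ring
  rw [hz]
  dsimp only
  rw [pvTrail_eq]
  dsimp only
  rw [pvRest_bridge L₂ s (by omega) (by omega)]
  have hcore : (if leave ≤ 0 then s
      else if leave ≤ ((((PySem.List.pyRange s 31 1).filter (fun d => !(L₂.contains d))).length : Nat) : Int)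
        then (PySem.List.pyGet? ((PySem.List.pyRange s 31 1).filter (fun d => !(L₂.contains d))) (leave - 1)).getD 0 + 1
      else 31) = pvCore L₂ leave s := by
    unfold pvCore
    rfl
  rw [hcore]
  rw [← pvCore_congr L₁ L₂ hm leave s]
  rw [← pvSkipB_congr L₁ L₂ hm]
  have harith : 0 + (pvCore L₁ leave s - s) + (pvSkipB L₁ (pvCore L₁ leave s) - pvCore L₁ leave s)
      = pvSkipB L₁ (pvCore L₁ leave s) - s := by ring
  rw [harith]

theorem pvContains_eq (hs2 : List Int) :
    ∀ x, List.contains (PySem.Set.ofList (PySem.List.sorted hs2 (fun x => x) false) : List Int) x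
      = List.contains (PySem.Set.ofList hs2 : List Int) x := by
  intro x
  have h1 : ∀ (l : List Int), l.contains x = true ↔ x ∈ l := fun l => List.contains_iff_mem
  rw [Bool.eq_iff_iff, h1, h1, PySem.Set.mem_ofList, PySem.Set.mem_ofList, PySem.List.mem_sorted]

-- ===== VERDICT (by name: the statement is the Claim_ definition above) =====
theorem solution_spec : Claim_equal_solution := by
  intro leave day holidays _ _
  unfold Spec_solution solution solution_alt
  by_cases h30 : leave == 30
  · rw [if_pos h30, if_pos h30]
  · rw [if_neg h30, if_neg h30]
    simp only []
    apply pvMain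
    apply pvContains_eq
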